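-- pv_equiv track=rewrite | github.com/piers-taylor-1994/python_practice | notes/algorithms_structures.py | matrix_traversal_dfs
-- ===== SOURCE A (Python) =====
-- def matrix_traversal_dfs(matrix):
--     if not matrix or not matrix[0]:
--         return []
--
--     DIRECTIONS = [
--         (-1, 0),
--         (0, 1),
--         (1, 0),
--         (0, -1)
--     ]
--
--     seen = set()
--     result = []
--
--     def dfs(row, col):
--         if row < 0 or row >= len(matrix) or col < 0 or col >= len(matrix[0]) or (row, col) in seen:
--             return
--
--         result.append((row, col))
--         seen.add((row, col))
--
--         for dr, dc in DIRECTIONS: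
--             dfs(dr + row, dc + col)
--
--     dfs(0, 0)
--     return result
-- ===== SOURCE B (Python) =====
-- def matrix_traversal_dfs(matrix):
--     if not matrix or not matrix[0]:
--         return []
--
--     DIRECTIONS = [
--         (-1, 0),
--         (0, 1),
--         (1, 0),
--         (0, -1)
--     ]
--
--     rows, cols = len(matrix), len(matrix[0])
--     seen = set()
--     result = []
--     stack = [(0, 0)]
--     while stack:
--         row, col = stack.pop()
--         if row < 0 or row >= rows or col < 0 or col >= cols or (row, col) in seen:
--             continue
--         seen.add((row, col))
--         result.append((row, col))
--         for dr, dc in reversed(DIRECTIONS):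
--             stack.append((dr + row, dc + col))
--     return result
-- ===== Notes on version B (the rewrite author's own statement) =====
-- stated objective: alternative
-- what changed: Replaces the nested recursive dfs helper (call stack + shared closure state) with an iterative loop over an explicit stack seeded with (0,0), pushing the four neighbors in reverse direction order and doing the bounds/seen check at pop time.
import Mathlib
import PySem

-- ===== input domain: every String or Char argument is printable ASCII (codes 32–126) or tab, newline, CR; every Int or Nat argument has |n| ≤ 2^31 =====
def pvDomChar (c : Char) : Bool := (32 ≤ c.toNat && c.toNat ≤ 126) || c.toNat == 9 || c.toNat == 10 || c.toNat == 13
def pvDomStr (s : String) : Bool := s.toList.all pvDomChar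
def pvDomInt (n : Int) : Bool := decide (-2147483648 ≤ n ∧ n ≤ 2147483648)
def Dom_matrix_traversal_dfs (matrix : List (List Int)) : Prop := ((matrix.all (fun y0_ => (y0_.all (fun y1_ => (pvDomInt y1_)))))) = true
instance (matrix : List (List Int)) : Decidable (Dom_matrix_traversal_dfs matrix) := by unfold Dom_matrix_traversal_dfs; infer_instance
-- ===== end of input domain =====

-- B replaces A's nested recursive dfs helper by an explicit-stack loop (same DIRECTIONS,
-- neighbors pushed in reverse so pop order matches the recursive pre-order); alternative
-- decomposition, same cost, return value proved identical.

-- ===== PORT A =====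
def dirsA : List (Int × Int) := [(-1, 0), (0, 1), (1, 0), (0, -1)]

-- literal port of the recursive closure `dfs`; state = (seen, result); the Nat argument is
-- only a totality guard (each recursion level is given one unit; the top call supplies
-- rows*cols+1, which the proofs show is never exhausted).
def dfsA (R C : Int) : Nat → (PySem.Set (Int × Int) × List (Int × Int)) → Int → Int →
    (PySem.Set (Int × Int) × List (Int × Int))
  | 0, st, _, _ => st
  | Nat.succ f, st, row, col =>
    if row < 0 ∨ R ≤ row ∨ col < 0 ∨ C ≤ col ∨ (row, col) ∈ st.1 then st
    else
      dirsA.foldl (fun st' d => dfsA R C f st' (d.1 + row) (d.2 + col))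
        (PySem.Set.add st.1 (row, col), st.2 ++ [(row, col)])

def matrix_traversal_dfs (matrix : List (List Int)) : List (Int × Int) :=
  if matrix = [] ∨ matrix.headD [] = [] then []
  else
    (dfsA (matrix.length : Int) ((matrix.headD []).length : Int)
      (matrix.length * (matrix.headD []).length + 1) (PySem.Set.empty, []) 0 0).2

-- ===== PORT B =====
def dirsB : List (Int × Int) := [(-1, 0), (0, 1), (1, 0), (0, -1)]

-- the in-bounds cells, and the number of them not yet seen (termination measure of the loop)
def cellsOf (R C : Int) : List (Int × Int) :=
  (List.range R.toNat).flatMap (fun i => (List.range C.toNat).map (fun j => ((i : Int), (j : Int))))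

def meas (R C : Int) (seen : List (Int × Int)) : Nat :=
  (cellsOf R C).countP (fun p => decide (p ∉ seen))

theorem countP_lt_helper {α : Type} (xs : List α) (p q : α → Bool)
    (h : ∀ x, q x = true → p x = true) (a : α) (ha : a ∈ xs) (hp : p a = true)
    (hq : q a = false) : xs.countP q < xs.countP p := by
  induction xs with
  | nil => cases ha
  | cons b xs ih =>
    simp only [List.countP_cons]
    rcases List.mem_cons.mp ha with rfl | hmem
    · have hle : xs.countP q ≤ xs.countP p :=
        List.countP_mono_left (fun x _ hx => h x hx)
      simp [hp, hq]; omega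
    · have := ih hmem
      by_cases hqb : q b = true
      · simp [hqb, h b hqb]; omega
      · simp only [Bool.not_eq_true] at hqb
        simp [hqb]; split <;> omega

theorem mem_cellsOf (R C row col : Int) :
    ((row, col) ∈ cellsOf R C) ↔ (0 ≤ row ∧ row < R ∧ 0 ≤ col ∧ col < C) := by
  simp [cellsOf]
  constructor
  · rintro ⟨⟨a, ha, rfl⟩, ⟨b, hb, rfl⟩⟩; omega
  · rintro ⟨h1, h2, h3, h4⟩
    exact ⟨⟨row.toNat, by omega, by omega⟩, ⟨col.toNat, by omega, by omega⟩⟩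

theorem set_add_eq_append {α : Type} [BEq α] [LawfulBEq α] (s : PySem.Set α) (x : α)
    (h : x ∉ s) : PySem.Set.add s x = s ++ [x] := by
  simp [PySem.Set.add, PySem.Set.contains, h]

theorem meas_add_lt (R C : Int) (seen : List (Int × Int)) (row col : Int)
    (h1 : 0 ≤ row) (h2 : row < R) (h3 : 0 ≤ col) (h4 : col < C)
    (h5 : (row, col) ∉ seen) :
    meas R C (PySem.Set.add seen (row, col)) < meas R C seen := by
  rw [set_add_eq_append seen _ h5]
  refine countP_lt_helper _ _ _ ?_ (row, col) ((mem_cellsOf R C row col).mpr ⟨h1, h2, h3, h4⟩) ?_ ?_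
  · intro x hx
    simp only [decide_eq_true_eq, List.mem_append] at hx ⊢
    exact fun hm => hx (Or.inl hm)
  · simpa using h5
  · simp

-- literal port of Source B's while-loop; the Lean list's head is the Python list's END
-- (Python pops from the end; appending reversed(DIRECTIONS) one by one to the end is
-- prepending DIRECTIONS, so the pop order is DIRECTIONS order, exactly as in Source B).
def loopB (R C : Int) (seen : PySem.Set (Int × Int)) (result : List (Int × Int))
    (stack : List (Int × Int)) : List (Int × Int) :=
  match stack with
  | [] => result
  | (row, col) :: rest =>
    if h : row < 0 ∨ R ≤ row ∨ col < 0 ∨ C ≤ col ∨ (row, col) ∈ seen then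
      loopB R C seen result rest
    else
      loopB R C (PySem.Set.add seen (row, col)) (result ++ [(row, col)])
        (dirsB.map (fun d => (d.1 + row, d.2 + col)) ++ rest)
termination_by meas R C seen * 5 + stack.length
decreasing_by
  · simp
  · push_neg at h
    obtain ⟨h1, h2, h3, h4, h5⟩ := h
    have := meas_add_lt R C seen row col (by omega) (by omega) (by omega) (by omega) h5
    simp [dirsB]
    omega

def matrix_traversal_dfs_alt (matrix : List (List Int)) : List (Int × Int) :=
  if matrix = [] ∨ matrix.headD [] = [] then []
  else
    loopB (matrix.length : Int) ((matrix.headD []).length : Int) PySem.Set.empty [] [(0, 0)]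

-- ===== PRECONDITION & SPEC =====
def Spec_matrix_traversal_dfs (matrix : List (List Int)) (out : List (Int × Int)) : Prop := out = matrix_traversal_dfs_alt matrix
instance (matrix : List (List Int)) (out : List (Int × Int)) : Decidable (Spec_matrix_traversal_dfs matrix out) := by unfold Spec_matrix_traversal_dfs; infer_instance

-- ===== CLAIM (what is proved, stated in full; the proofs are below) =====
def Claim_equal_matrix_traversal_dfs : Prop := ∀ (matrix : List (List Int)), Dom_matrix_traversal_dfs matrix → Spec_matrix_traversal_dfs matrix (matrix_traversal_dfs matrix)

-- ===== LEMMAS AND PROOFS =====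

theorem countP_le_helper {α : Type} (xs : List α) (p q : α → Bool)
    (h : ∀ x, q x = true → p x = true) : xs.countP q ≤ xs.countP p :=
  List.countP_mono_left (fun x _ hx => h x hx)

theorem meas_add_le (R C : Int) (seen : List (Int × Int)) (x : Int × Int) :
    meas R C (PySem.Set.add seen x) ≤ meas R C seen := by
  by_cases h : x ∈ seen
  · simp [PySem.Set.add, PySem.Set.contains, h]
  · rw [set_add_eq_append seen x h]
    refine countP_le_helper _ _ _ ?_
    intro y hy
    simp only [decide_eq_true_eq, List.mem_append] at hy ⊢
    exact fun hm => hy (Or.inl hm)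

theorem dfsA_meas_le (R C : Int) :
    ∀ (f : Nat) (st : PySem.Set (Int × Int) × List (Int × Int)) (row col : Int),
      meas R C (dfsA R C f st row col).1 ≤ meas R C st.1 := by
  intro f
  induction f with
  | zero => intro st row col; simp [dfsA]
  | succ f ih =>
    intro st row col
    rw [dfsA]
    split
    · exact le_rfl
    · have fold : ∀ (ps : List (Int × Int)) (st' : PySem.Set (Int × Int) × List (Int × Int)),
          meas R C ((ps.foldl (fun st'' d => dfsA R C f st'' (d.1 + row) (d.2 + col)) st')).1
            ≤ meas R C st'.1 := by
        intro ps
        induction ps with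
        | nil => intro st'; simp
        | cons d ps ihp =>
          intro st'
          simp only [List.foldl_cons]
          exact le_trans (ihp _) (ih st' (d.1 + row) (d.2 + col))
      exact le_trans (fold dirsA _) (meas_add_le R C st.1 (row, col))

theorem bridge (R C : Int) :
    ∀ (f : Nat) (seen : PySem.Set (Int × Int)) (result : List (Int × Int))
      (row col : Int) (rest : List (Int × Int)),
      meas R C seen < f →
      loopB R C seen result ((row, col) :: rest)
        = loopB R C (dfsA R C f (seen, result) row col).1
            (dfsA R C f (seen, result) row col).2 rest := by
  intro f
  induction f with
  | zero => intro _ _ _ _ _ h; omega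
  | succ f ih =>
    intro seen result row col rest hm
    by_cases hc : row < 0 ∨ R ≤ row ∨ col < 0 ∨ C ≤ col ∨ (row, col) ∈ seen
    · rw [loopB, dfsA]
      simp [hc]
    · push_neg at hc
      obtain ⟨h1, h2, h3, h4, h5⟩ := hc
      have hcond : ¬(row < 0 ∨ R ≤ row ∨ col < 0 ∨ C ≤ col ∨ (row, col) ∈ seen) := by
        push_neg; exact ⟨h1, h2, h3, h4, h5⟩
      have hlt : meas R C (PySem.Set.add seen (row, col)) < meas R C seen :=
        meas_add_lt R C seen row col (by omega) (by omega) (by omega) (by omega) h5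
      have fold : ∀ (ps : List (Int × Int)) (st : PySem.Set (Int × Int) × List (Int × Int))
          (rest' : List (Int × Int)), meas R C st.1 < f →
          loopB R C st.1 st.2 (ps.map (fun d => (d.1 + row, d.2 + col)) ++ rest')
            = loopB R C ((ps.foldl (fun st' d => dfsA R C f st' (d.1 + row) (d.2 + col)) st)).1
                ((ps.foldl (fun st' d => dfsA R C f st' (d.1 + row) (d.2 + col)) st)).2 rest' := by
        intro ps
        induction ps with
        | nil => intro st rest' _; simp
        | cons d ps ihp =>
          intro st rest' hst
          simp only [List.map_cons, List.cons_append, List.foldl_cons]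
          rw [ih st.1 st.2 (d.1 + row) (d.2 + col) _ hst]
          exact ihp _ _ (lt_of_le_of_lt (dfsA_meas_le R C f st (d.1 + row) (d.2 + col)) hst)
      rw [loopB]
      simp only [hcond, dite_false, dif_neg]
      rw [dfsA]
      simp only [hcond, if_neg]
      have : dirsB = dirsA := rfl
      rw [this]
      refine fold dirsA (PySem.Set.add seen (row, col), result ++ [(row, col)]) rest ?_
      show meas R C (PySem.Set.add seen (row, col)) < f
      omega

theorem meas_empty (R C : Int) : meas R C [] = R.toNat * C.toNat := by
  have h : (fun p => decide (p ∉ ([] : List (Int × Int)))) = fun _ => true := by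
    funext p; simp
  rw [meas, h, List.countP_true]
  simp only [cellsOf, List.length_flatMap, List.map_map]
  simp [Function.comp, List.map_const']

-- ===== VERDICT (by name: the statement is the Claim_ definition above) =====
theorem matrix_traversal_dfs_spec : Claim_equal_matrix_traversal_dfs := by
  intro matrix _
  unfold Spec_matrix_traversal_dfs matrix_traversal_dfs matrix_traversal_dfs_alt
  by_cases hg : matrix = [] ∨ matrix.headD [] = []
  · rw [if_pos hg, if_pos hg]
  · rw [if_neg hg, if_neg hg]
    have hm : meas (matrix.length : Int) ((matrix.headD []).length : Int) []
        < matrix.length * (matrix.headD []).length + 1 := by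
      rw [meas_empty]; simp
    rw [show (PySem.Set.empty : PySem.Set (Int × Int)) = ([] : List (Int × Int)) from rfl]
    rw [bridge (matrix.length : Int) ((matrix.headD []).length : Int)
      (matrix.length * (matrix.headD []).length + 1) [] [] 0 0 [] hm]
    rw [loopB]
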